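-- pv_equiv track=rewrite | github.com/Tormen/my-uhs | my-uhs.py | decrypt_string
-- ===== SOURCE A (Python) =====
-- def decrypt_string(s: str) -> str:
--     """For 88a content and standalone 'hint' hunks (no key)."""
--     buf = []
--     for ch in s:
--         c = ord(ch)
--         if c < 32:
--             continue
--         c = c * 2 - 32 if c < 80 else c * 2 - 127
--         buf.append(chr(c))
--     return "".join(buf)
-- ===== SOURCE B (Python) =====
-- def decrypt_string(s: str) -> str:
--     """For 88a content and standalone 'hint' hunks (no key)."""
--     n = len(s)
--     if n == 0:
--         return ""
--     if n == 1:
--         c = ord(s)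
--         if c < 32:
--             return ""
--         return chr(c * 2 - 32 if c < 80 else c * 2 - 127)
--     m = n // 2
--     return decrypt_string(s[:m]) + decrypt_string(s[m:])
-- ===== Notes on version B (the rewrite author's own statement) =====
-- stated objective: alternative
-- what changed: Divide-and-conquer: splits the string in halves, decrypts each half recursively and concatenates, with the per-character transform only at the single-character base case, instead of A's single left-to-right loop accumulating into a list; correct because the transform is character-local, so concatenation of decrypted halves equals the decryption of the whole.
import Mathlib
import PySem

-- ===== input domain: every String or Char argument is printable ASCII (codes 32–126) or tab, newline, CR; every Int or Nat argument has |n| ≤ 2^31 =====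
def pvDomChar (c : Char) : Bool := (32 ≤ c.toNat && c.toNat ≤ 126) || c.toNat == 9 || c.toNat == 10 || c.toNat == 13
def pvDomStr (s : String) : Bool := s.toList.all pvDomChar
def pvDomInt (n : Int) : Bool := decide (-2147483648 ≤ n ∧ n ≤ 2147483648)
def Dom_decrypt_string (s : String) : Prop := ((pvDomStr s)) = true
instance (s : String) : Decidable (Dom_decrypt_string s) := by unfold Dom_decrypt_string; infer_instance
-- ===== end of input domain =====

-- B decrypts by divide-and-conquer (split in halves, recurse, concatenate; the per-character
-- transform lives only in the one-character base case) instead of A's left-to-right accumulating loop; alternative structure, same cost class.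


-- ===== PORT A =====
-- loop: for ch in s: skip control chars, append chr(c*2-32 / c*2-127)
def decrypt_string (s : String) : String :=
  String.ofList (s.toList.foldl (fun buf ch =>
    let c := ch.toNat
    if c < 32 then buf
    else buf ++ [Char.ofNat (if c < 80 then c * 2 - 32 else c * 2 - 127)]) [])

-- ===== PORT B =====
-- divide and conquer over the character list: empty / single char / split at len // 2
def pvDec (l : List Char) : List Char :=
  if _ : l.length = 0 then []
  else if _ : l.length = 1 then
    match l with
    | [a] =>
        let c := a.toNat
        if c < 32 then [] else [Char.ofNat (if c < 80 then c * 2 - 32 else c * 2 - 127)]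
    | _ => []
  else
    let m := l.length / 2
    pvDec (l.take m) ++ pvDec (l.drop m)
termination_by l.length
decreasing_by
  · simp [List.length_take]; omega
  · simp [List.length_drop]; omega

def decrypt_string_alt (s : String) : String := String.ofList (pvDec s.toList)

-- ===== PRECONDITION & SPEC =====
def Spec_decrypt_string (s : String) (out : String) : Prop := out = decrypt_string_alt s
instance (s : String) (out : String) : Decidable (Spec_decrypt_string s out) := by unfold Spec_decrypt_string; infer_instance

-- ===== CLAIM (what is proved, stated in full; the proofs are below) =====
def Claim_equal_decrypt_string : Prop := ∀ (s : String), Dom_decrypt_string s → Spec_decrypt_string s (decrypt_string s)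

-- ===== LEMMAS AND PROOFS =====

-- the character-local transform both programs apply (none = dropped control char)
def pvEntry (ch : Char) : Option Char :=
  if ch.toNat < 32 then none
  else some (Char.ofNat (if ch.toNat < 80 then ch.toNat * 2 - 32 else ch.toNat * 2 - 127))

-- A's accumulate-or-skip loop is a filterMap by pvEntry
theorem pvFoldl_eq_filterMap (l : List Char) (acc : List Char) :
    l.foldl (fun buf ch =>
      let c := ch.toNat
      if c < 32 then buf
      else buf ++ [Char.ofNat (if c < 80 then c * 2 - 32 else c * 2 - 127)]) acc
      = acc ++ l.filterMap pvEntry := by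
  induction l generalizing acc with
  | nil => simp
  | cons a l ih =>
    simp only [List.foldl_cons, List.filterMap_cons, pvEntry]
    by_cases h : a.toNat < 32 <;> simp [pvEntry, h, ih]

-- B's divide-and-conquer is the same filterMap: concatenation of halves = filterMap of the whole
theorem pvDec_eq_filterMap_aux : ∀ (n : Nat) (l : List Char), l.length = n →
    pvDec l = l.filterMap pvEntry := by
  intro n
  induction n using Nat.strong_induction_on with
  | _ n ih =>
    intro l hl
    rw [pvDec]
    by_cases h0 : l.length = 0
    · simp [List.length_eq_zero_iff.mp h0]
    · by_cases h1 : l.length = 1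
      · obtain ⟨a, ha⟩ := List.length_eq_one_iff.mp h1
        subst ha
        rw [dif_neg h0, dif_pos h1]
        simp only [pvEntry, List.filterMap_cons, List.filterMap_nil]
        by_cases h : a.toNat < 32 <;> simp [h]
      · rw [dif_neg h0, dif_neg h1]
        show pvDec (l.take (l.length / 2)) ++ pvDec (l.drop (l.length / 2)) = _
        rw [ih (l.take (l.length / 2)).length (by simp [List.length_take]; omega) _ rfl,
            ih (l.drop (l.length / 2)).length (by simp [List.length_drop]; omega) _ rfl,
            ← List.filterMap_append, List.take_append_drop]

theorem pvDec_eq_filterMap (l : List Char) : pvDec l = l.filterMap pvEntry :=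
  pvDec_eq_filterMap_aux l.length l rfl

-- ===== VERDICT (by name: the statement is the Claim_ definition above) =====
theorem decrypt_string_spec : Claim_equal_decrypt_string := by
  intro s _
  unfold Spec_decrypt_string decrypt_string decrypt_string_alt
  rw [pvFoldl_eq_filterMap, List.nil_append, pvDec_eq_filterMap]
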